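-- pv_equiv track=rewrite | github.com/ravidn1224/english-teacher-app | app/routers/reports.py | _shift_month
-- ===== SOURCE A (Python) =====
-- from typing import Any, List, Optional, Tuple
--
-- def _shift_month(year: int, month: int, delta: int) -> Tuple[int, int]:
--     m = month + delta
--     y = year
--     while m > 12:
--         m -= 12
--         y += 1
--     while m < 1:
--         m += 12
--         y -= 1
--     return y, m
-- ===== SOURCE B (Python) =====
-- def _shift_month(year, month, delta):
--     n = month + delta - 1
--     return year + n // 12, n % 12 + 1
-- ===== Notes on version B (the rewrite author's own statement) =====
-- stated objective: simpler
-- what changed: Replaces the two 12-step normalization while-loops with one closed-form floor-division/modulo on the 0-based month index.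
import Mathlib
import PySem

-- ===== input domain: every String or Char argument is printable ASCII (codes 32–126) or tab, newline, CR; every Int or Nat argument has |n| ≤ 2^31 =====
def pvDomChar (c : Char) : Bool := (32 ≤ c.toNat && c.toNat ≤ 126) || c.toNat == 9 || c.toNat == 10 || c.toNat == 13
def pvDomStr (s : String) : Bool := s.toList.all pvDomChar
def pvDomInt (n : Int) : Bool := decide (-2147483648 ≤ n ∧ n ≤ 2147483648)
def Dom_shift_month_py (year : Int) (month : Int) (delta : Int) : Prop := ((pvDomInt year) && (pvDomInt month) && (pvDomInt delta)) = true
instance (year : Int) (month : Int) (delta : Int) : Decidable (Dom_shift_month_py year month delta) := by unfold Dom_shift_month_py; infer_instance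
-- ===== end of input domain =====

-- B replaces A's two while-loops by one closed-form floordiv/mod computation (simpler, O(1) vs O(|delta|)).
-- ===== PORT A =====
-- 'while m > 12: m -= 12; y += 1'
def shiftLoopDown (y m : Int) : Int × Int :=
  if 12 < m then shiftLoopDown (y + 1) (m - 12) else (y, m)
termination_by m.toNat
decreasing_by omega

-- 'while m < 1: m += 12; y -= 1'
def shiftLoopUp (y m : Int) : Int × Int :=
  if m < 1 then shiftLoopUp (y - 1) (m + 12) else (y, m)
termination_by (1 - m).toNat
decreasing_by omega

def shift_month_py (year : Int) (month : Int) (delta : Int) : Int × Int :=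
  let m := month + delta
  let y := year
  let ym := shiftLoopDown y m
  let ym := shiftLoopUp ym.1 ym.2
  (ym.1, ym.2)

-- ===== PORT B =====
def shift_month_py_alt (year : Int) (month : Int) (delta : Int) : Int × Int :=
  let n := month + delta - 1
  (year + PySem.Int.floordiv n 12, PySem.Int.mod n 12 + 1)

-- ===== PRECONDITION & SPEC =====
def Spec_shift_month_py (year : Int) (month : Int) (delta : Int) (out : Int × Int) : Prop := out = shift_month_py_alt year month delta
instance (year : Int) (month : Int) (delta : Int) (out : Int × Int) : Decidable (Spec_shift_month_py year month delta out) := by unfold Spec_shift_month_py; infer_instance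

-- ===== CLAIM (what is proved, stated in full; the proofs are below) =====
def Claim_equal_shift_month_py : Prop := ∀ (year : Int) (month : Int) (delta : Int), Dom_shift_month_py year month delta → Spec_shift_month_py year month delta (shift_month_py year month delta)

-- ===== LEMMAS AND PROOFS =====

-- ===== VERDICT (by name: the statement is the Claim_ definition above) =====
theorem shiftLoopDown_spec (y m : Int) : 1 ≤ m →
    shiftLoopDown y m = (y + (m - 1) / 12, (m - 1) % 12 + 1) := by
  induction y, m using shiftLoopDown.induct with
  | case1 y m h ih =>
    intro _
    rw [shiftLoopDown, if_pos h, ih (by omega)]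
    simp only [Prod.mk.injEq]
    omega
  | case2 y m h =>
    intro hm
    rw [shiftLoopDown, if_neg h]
    simp only [Prod.mk.injEq]
    omega

theorem shiftLoopUp_spec (y m : Int) : m ≤ 12 →
    shiftLoopUp y m = (y + (m - 1) / 12, (m - 1) % 12 + 1) := by
  induction y, m using shiftLoopUp.induct with
  | case1 y m h ih =>
    intro _
    rw [shiftLoopUp, if_pos h, ih (by omega)]
    simp only [Prod.mk.injEq]
    omega
  | case2 y m h =>
    intro hm
    rw [shiftLoopUp, if_neg h]
    simp only [Prod.mk.injEq]
    omega

theorem shift_core (y m : Int) :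
    shiftLoopUp (shiftLoopDown y m).1 (shiftLoopDown y m).2
      = (y + (m - 1) / 12, (m - 1) % 12 + 1) := by
  by_cases h : 1 ≤ m
  · rw [shiftLoopDown_spec y m h, shiftLoopUp_spec _ _ (by omega)]
    simp only [Prod.mk.injEq]
    omega
  · rw [shiftLoopDown, if_neg (by omega)]
    exact shiftLoopUp_spec _ _ (by omega)

theorem shift_month_py_spec : Claim_equal_shift_month_py := by
  intro year month delta _
  simp only [Spec_shift_month_py, shift_month_py, shift_month_py_alt]
  rw [PySem.Int.floordiv_eq_ediv_of_pos (by omega : (0:Int) < 12),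
      PySem.Int.mod_eq_emod_of_pos (by omega : (0:Int) < 12)]
  simpa using shift_core year (month + delta)
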